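-- pv_equiv track=rewrite | github.com/koii-network/prometheus-beta | src/word_occurrence_indexer.py | find_word_occurrences
-- ===== SOURCE A (Python) =====
-- def find_word_occurrences(input_string, target_word):
--     """
--     Find all occurrences of a target word in a given string,
--     with the character index of each occurrence.
--
--     Args:
--         input_string (str): The string to search in
--         target_word (str): The word to find occurrences of
--
--     Returns:
--         list: A list of tuples containing (char_index, occurrence)
--                where char_index is the total number of characters
--                up to the start of the occurrence
--
--     Raises:
--         TypeError: If input_string or target_word is not a string
--         ValueError: If target_word is an empty string
--     """
--     # Validate inputs
--     if not isinstance(input_string, str):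
--         raise TypeError("input_string must be a string")
--     if not isinstance(target_word, str):
--         raise TypeError("target_word must be a string")
--     if not target_word:
--         raise ValueError("target_word cannot be an empty string")
--
--     # Initialize results list and tracking variables
--     occurrences = []
--     words = input_string.split()
--     current_char_index = 0
--
--     # Iterate through words to find matches and track character index
--     for word in words:
--         # Check if current word matches target
--         if word == target_word:
--             occurrences.append((current_char_index, word))
--
--         # Update character index (add word length + space, except for last word)
--         current_char_index += len(word) + 1
--
--     return occurrences
-- ===== SOURCE B (Python) =====
-- def find_word_occurrences(input_string, target_word):
--     if not isinstance(input_string, str):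
--         raise TypeError("input_string must be a string")
--     if not isinstance(target_word, str):
--         raise TypeError("target_word must be a string")
--     if not target_word:
--         raise ValueError("target_word cannot be an empty string")
--
--     # Character-level state machine over the raw string: no split().
--     # Words are maximal runs of non-whitespace; ci is the cumulative
--     # (whitespace-normalized) character index of the current word's start.
--     occurrences = []
--     ci = 0
--     cur = []
--     for c in input_string:
--         if c.isspace():
--             if cur:
--                 w = ''.join(cur)
--                 if w == target_word:
--                     occurrences.append((ci, w))
--                 ci += len(w) + 1
--                 cur = []
--         else:
--             cur.append(c)
--     if cur:
--         w = ''.join(cur)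
--         if w == target_word:
--             occurrences.append((ci, w))
--     return occurrences
-- ===== Notes on version B (the rewrite author's own statement) =====
-- stated objective: alternative
-- what changed: B never calls split(): it is a character-level state machine over the raw string that detects maximal non-whitespace runs, builds each word and its cumulative offset on the fly in one char scan, whereas A splits into a word list first and loops over words.
import Mathlib
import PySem

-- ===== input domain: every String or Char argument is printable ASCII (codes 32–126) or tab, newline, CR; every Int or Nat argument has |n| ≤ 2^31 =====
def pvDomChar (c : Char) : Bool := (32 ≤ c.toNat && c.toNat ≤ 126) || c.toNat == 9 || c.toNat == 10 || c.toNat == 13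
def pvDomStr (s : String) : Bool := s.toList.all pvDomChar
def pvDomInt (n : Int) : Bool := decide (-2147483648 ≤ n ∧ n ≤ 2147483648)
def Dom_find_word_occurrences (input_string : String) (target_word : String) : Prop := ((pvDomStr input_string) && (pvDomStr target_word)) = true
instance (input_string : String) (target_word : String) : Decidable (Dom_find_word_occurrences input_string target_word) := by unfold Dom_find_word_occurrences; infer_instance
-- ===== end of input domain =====

-- B replaces A's split-then-loop with a character-level state machine over the raw string
-- (no split()): an alternative algorithm of the same cost.

-- ===== PORT A =====
def find_word_occurrences (input_string : String) (target_word : String) : List (Int × String) :=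
  let words := PySem.Str.split₀ input_string
  (words.foldl (fun (st : List (Int × String) × Int) word =>
      ((if word == target_word then st.1 ++ [(st.2, word)] else st.1),
       st.2 + PySem.Str.len word + 1)) ([], 0)).1

-- ===== PORT B =====
-- finalization of Source B's trailing `if cur:` block
def fwoB_finish (target_word : String) (st : List (Int × String) × Int × List Char) : List (Int × String) :=
  if st.2.2.isEmpty then st.1
  else
    let w := String.ofList st.2.2
    if w == target_word then st.1 ++ [(st.2.1, w)] else st.1

def find_word_occurrences_alt (input_string : String) (target_word : String) : List (Int × String) :=
  fwoB_finish target_word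
    (input_string.toList.foldl (fun (st : List (Int × String) × Int × List Char) c =>
      if PySem.Chars.isspace c then
        if st.2.2.isEmpty then st
        else
          let w := String.ofList st.2.2
          ((if w == target_word then st.1 ++ [(st.2.1, w)] else st.1),
           st.2.1 + PySem.Str.len w + 1, [])
      else (st.1, st.2.1, st.2.2 ++ [c])) ([], 0, []))

-- ===== PRECONDITION & SPEC =====
-- Pre_ excludes exactly target_word = "", on which the Python A raises ValueError.
def Pre_find_word_occurrences (input_string : String) (target_word : String) : Prop :=
  target_word ≠ ""
instance (input_string : String) (target_word : String) : Decidable (Pre_find_word_occurrences input_string target_word) := by unfold Pre_find_word_occurrences; infer_instance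
def pvWitness_find_word_occurrences : String × String := ("a b a", "a")

def Spec_find_word_occurrences (input_string : String) (target_word : String) (out : List (Int × String)) : Prop := out = find_word_occurrences_alt input_string target_word
instance (input_string : String) (target_word : String) (out : List (Int × String)) : Decidable (Spec_find_word_occurrences input_string target_word out) := by unfold Spec_find_word_occurrences; infer_instance

-- ===== CLAIM (what is proved, stated in full; the proofs are below) =====
def Claim_equal_find_word_occurrences : Prop := ∀ (input_string : String) (target_word : String), Dom_find_word_occurrences input_string target_word → Pre_find_word_occurrences input_string target_word → Spec_find_word_occurrences input_string target_word (find_word_occurrences input_string target_word)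

-- ===== LEMMAS AND PROOFS =====

-- reference result: matches of t among words ws, with running offset c
def pvGo (t : String) : List String → Int → List (Int × String)
  | [], _ => []
  | w :: ws, c => (if w == t then [(c, w)] else []) ++ pvGo t ws (c + PySem.Str.len w + 1)

theorem pvA_fold (t : String) (ws : List String) :
    ∀ (acc : List (Int × String)) (c : Int),
    (ws.foldl (fun (st : List (Int × String) × Int) word =>
      ((if word == t then st.1 ++ [(st.2, word)] else st.1),
       st.2 + PySem.Str.len word + 1)) (acc, c)).1 = acc ++ pvGo t ws c := by
  induction ws with
  | nil => intro acc c; simp [pvGo]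
  | cons w ws ih =>
    intro acc c
    simp only [List.foldl_cons]
    rw [ih]
    by_cases h : (w == t) = true <;> simp [pvGo, h, List.append_assoc]

-- split₀.go's accumulator is a reversed prefix
theorem pvGo_acc (rest : List Char) :
    ∀ (cur : List Char) (acc : List (List Char)),
    PySem.Chars.split₀.go rest cur acc = acc.reverse ++ PySem.Chars.split₀.go rest cur [] := by
  induction rest with
  | nil =>
    intro cur acc
    by_cases h : cur.isEmpty = true <;> simp [PySem.Chars.split₀.go, h]
  | cons c rest ih =>
    intro cur acc
    by_cases hs : PySem.Chars.isspace c = true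
    · by_cases h : cur.isEmpty = true
      · simp only [PySem.Chars.split₀.go, hs, h, if_true]
        exact ih [] acc
      · simp only [PySem.Chars.split₀.go, hs, h, if_true, if_false, Bool.false_eq_true]
        rw [ih [] (cur.reverse :: acc), ih [] [cur.reverse]]
        simp
    · simp only [PySem.Chars.split₀.go, hs, Bool.false_eq_true, if_false]
      exact ih (c :: cur) acc

-- the character-level recursion that Source B's loop computes, related to split₀.go
def pvGoB (t : String) : List Char → List Char → Int → List (Int × String)
  | [], cur, ci =>
      if cur.isEmpty then []
      else if String.ofList cur == t then [(ci, String.ofList cur)] else []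
  | c :: rest, cur, ci =>
      if PySem.Chars.isspace c then
        if cur.isEmpty then pvGoB t rest [] ci
        else (if String.ofList cur == t then [(ci, String.ofList cur)] else [])
              ++ pvGoB t rest [] (ci + PySem.Str.len (String.ofList cur) + 1)
      else pvGoB t rest (cur ++ [c]) ci

theorem pvB_fold (t : String) (rest : List Char) :
    ∀ (occ : List (Int × String)) (ci : Int) (cur : List Char),
    fwoB_finish t
      (rest.foldl (fun (st : List (Int × String) × Int × List Char) c =>
        if PySem.Chars.isspace c then
          if st.2.2.isEmpty then st
          else
            let w := String.ofList st.2.2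
            ((if w == t then st.1 ++ [(st.2.1, w)] else st.1),
             st.2.1 + PySem.Str.len w + 1, [])
        else (st.1, st.2.1, st.2.2 ++ [c])) (occ, ci, cur))
    = occ ++ pvGoB t rest cur ci := by
  induction rest with
  | nil =>
    intro occ ci cur
    by_cases h : cur.isEmpty = true
    · simp [fwoB_finish, pvGoB, h]
    · by_cases hm : (String.ofList cur == t) = true <;>
        simp [fwoB_finish, pvGoB, h, hm]
  | cons c rest ih =>
    intro occ ci cur
    simp only [List.foldl_cons]
    by_cases hs : PySem.Chars.isspace c = true
    · by_cases h : cur.isEmpty = true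
      · simp only [hs, h, if_true]
        rw [ih occ ci cur]
        have : cur = [] := by simpa [List.isEmpty_iff] using h
        simp [pvGoB, hs, this]
      · simp only [hs, h, if_true, if_false, Bool.false_eq_true]
        rw [ih]
        by_cases hm : (String.ofList cur == t) = true <;>
          simp [pvGoB, hs, h, hm, List.append_assoc]
    · simp only [hs, Bool.false_eq_true, if_false]
      rw [ih]
      simp [pvGoB, hs]

theorem pvGoB_eq_go (t : String) (rest : List Char) :
    ∀ (cur : List Char) (ci : Int),
    pvGoB t rest cur ci
      = pvGo t ((PySem.Chars.split₀.go rest cur.reverse []).map String.ofList) ci := by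
  induction rest with
  | nil =>
    intro cur ci
    by_cases h : cur.isEmpty = true
    · have : cur = [] := by simpa [List.isEmpty_iff] using h
      simp [pvGoB, PySem.Chars.split₀.go, this, pvGo]
    · have h' : cur.reverse.isEmpty = false := by
        cases cur <;> simp_all
      by_cases hm : (String.ofList cur == t) = true <;>
        simp [pvGoB, PySem.Chars.split₀.go, h, h', hm, pvGo]
  | cons c rest ih =>
    intro cur ci
    by_cases hs : PySem.Chars.isspace c = true
    · by_cases h : cur.isEmpty = true
      · have hc : cur = [] := by simpa [List.isEmpty_iff] using h
        simp only [pvGoB, hs, if_true, PySem.Chars.split₀.go, hc]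
        simpa using ih [] ci
      · have h' : cur.reverse.isEmpty = false := by
          cases cur <;> simp_all
        simp only [pvGoB, hs, h, if_true, if_false, Bool.false_eq_true,
          PySem.Chars.split₀.go, h']
        rw [pvGo_acc rest [] [cur.reverse.reverse]]
        have hih := ih [] (ci + PySem.Str.len (String.ofList cur) + 1)
        simp only [List.reverse_nil] at hih
        simp only [List.reverse_cons, List.reverse_reverse, List.reverse_nil, List.nil_append,
          List.map_cons, List.singleton_append, pvGo, hih]
    · simp only [pvGoB, hs, Bool.false_eq_true, if_false, PySem.Chars.split₀.go]
      have := ih (cur ++ [c]) ci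
      simpa using this

-- ===== VERDICT (by name: the statement is the Claim_ definition above) =====
theorem find_word_occurrences_spec : Claim_equal_find_word_occurrences := by
  intro s t _ _
  unfold Spec_find_word_occurrences find_word_occurrences find_word_occurrences_alt
  simp only []
  rw [pvA_fold t (PySem.Str.split₀ s) [] 0, pvB_fold t s.toList [] 0 []]
  rw [pvGoB_eq_go t s.toList [] 0]
  simp [PySem.Str.split₀, PySem.Chars.split₀]
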